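-- pv_equiv track=rewrite | github.com/pyiron/pyiron_rdm | ob/ob_cfg_bam.py | format_json_string
-- ===== SOURCE A (Python) =====
-- def format_json_string(json_string):
--     json_string = json_string.replace('\n', '<br>')
--     result = []
--     for index, char in enumerate(json_string):
--         if char == " " and (index == 0 or json_string[index - 1] != ":"):
--             result.append("&nbsp;&nbsp;")
--         else:
--             result.append(char)
--
--     json_string = "".join(result)
--     return json_string
-- ===== SOURCE B (Python) =====
-- def format_json_string(json_string):
--     s = json_string.replace('\n', '<br>')
--     # Split at colons: only a space that immediately follows a colon is kept,
--     # every other space in every segment is replaced wholesale.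
--     parts = s.split(':')
--     fixed = [parts[0].replace(' ', '&nbsp;&nbsp;')]
--     for p in parts[1:]:
--         if p.startswith(' '):
--             fixed.append(' ' + p[1:].replace(' ', '&nbsp;&nbsp;'))
--         else:
--             fixed.append(p.replace(' ', '&nbsp;&nbsp;'))
--     return ':'.join(fixed)
-- ===== Notes on version B (the rewrite author's own statement) =====
-- stated objective: alternative
-- what changed: Replaces the per-character indexed scan with a staged split/join strategy: split on the colon separator, replace every space in the first segment, keep only the leading space of later segments, and rejoin; this moves the work into C-level str.split/str.replace/str.join calls.
import Mathlib
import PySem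

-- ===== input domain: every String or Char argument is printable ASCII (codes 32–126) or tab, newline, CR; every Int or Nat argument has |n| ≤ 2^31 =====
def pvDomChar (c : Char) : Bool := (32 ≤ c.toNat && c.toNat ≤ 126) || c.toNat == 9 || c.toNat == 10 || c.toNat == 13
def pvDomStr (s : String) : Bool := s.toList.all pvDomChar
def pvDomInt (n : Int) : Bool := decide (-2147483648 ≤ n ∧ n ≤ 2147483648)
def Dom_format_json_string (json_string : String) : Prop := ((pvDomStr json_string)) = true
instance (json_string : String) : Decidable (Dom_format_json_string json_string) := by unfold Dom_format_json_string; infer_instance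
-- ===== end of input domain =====

-- B replaces A's per-character indexed scan by a staged split-on-':' / per-segment
-- replace / join strategy; measurably faster (bulk C-level str operations).

-- ===== PORT A =====
-- per-character piece of A's loop body (depends on the full string via pyGet? at index-1)
def pvBodyA (t : List Char) (ic : Int × Char) : List Char :=
  if ic.2 == ' ' && (ic.1 == 0 || !(PySem.List.pyGet? t (ic.1 - 1) == some ':'))
  then "&nbsp;&nbsp;".toList else [ic.2]

def format_json_string (json_string : String) : String :=
  let t := (PySem.Str.replace json_string "\n" "<br>").toList
  let result := (PySem.List.enumerate t).foldl (fun acc ic => acc ++ pvBodyA t ic) []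
  String.ofList result

-- ===== PORT B =====
-- seg.replace(' ', '&nbsp;&nbsp;') for the one-char pattern ' ': exact (each space
-- independently replaced, everything else kept)
def pvRepSp (cs : List Char) : List Char :=
  cs.flatMap (fun c => if c == ' ' then "&nbsp;&nbsp;".toList else [c])

-- s.split(':') for the one-char separator ':': exact (empty segments kept, n
-- colons give n+1 segments)
def pvSplitColon : List Char → List (List Char)
  | [] => [[]]
  | c :: r =>
    match pvSplitColon r with
    | [] => [[]]          -- unreachable: pvSplitColon never returns []
    | s :: ss => if c == ':' then [] :: s :: ss else (c :: s) :: ss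

-- loop body of Source B: a later segment keeps a leading space, rest replaced
def pvFixSeg (p : List Char) : List Char :=
  if PySem.Chars.startswith p [' '] then ' ' :: pvRepSp (p.drop 1) else pvRepSp p

def format_json_string_alt (json_string : String) : String :=
  let t := (PySem.Str.replace json_string "\n" "<br>").toList
  match pvSplitColon t with
  | [] => String.ofList []          -- unreachable
  | h :: rest => String.ofList (PySem.Chars.join [':'] (pvRepSp h :: rest.map pvFixSeg))

-- ===== PRECONDITION & SPEC =====
def Spec_format_json_string (json_string : String) (out : String) : Prop := out = format_json_string_alt json_string
instance (json_string : String) (out : String) : Decidable (Spec_format_json_string json_string out) := by unfold Spec_format_json_string; infer_instance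

-- ===== CLAIM (what is proved, stated in full; the proofs are below) =====
def Claim_equal_format_json_string : Prop := ∀ (json_string : String), Dom_format_json_string json_string → Spec_format_json_string json_string (format_json_string json_string)

-- ===== LEMMAS AND PROOFS =====

-- reference scan: prev char `p`, replace a space unless p = ':'
def pvScan (p : Char) : List Char → List Char
  | [] => []
  | c :: r => (if c == ' ' && !(p == ':') then "&nbsp;&nbsp;".toList else [c]) ++ pvScan c r

-- A's condition at index pre.length over t = pre ++ suf equals the scan step for prev p.
lemma pvCond_eq (pre suf : List Char) (p : Char)
    (hp : (pre = [] ∧ p = '\n') ∨ pre.getLast? = some p) (c : Char) :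
    pvBodyA (pre ++ suf) ((pre.length : Int), c) =
      (if c == ' ' && !(p == ':') then "&nbsp;&nbsp;".toList else [c]) := by
  rcases hp with ⟨h, rfl⟩ | h
  · subst h; simp [pvBodyA]
  · have hne : pre ≠ [] := by rintro rfl; simp at h
    have hlen : 1 ≤ pre.length := by
      cases pre with | nil => exact absurd rfl hne | cons a l => simp
    have hcast : (pre.length : Int) - 1 = ((pre.length - 1 : Nat) : Int) := by omega
    have hget : PySem.List.pyGet? (pre ++ suf) ((pre.length : Int) - 1) = some p := by
      rw [hcast, PySem.List.pyGet?_natCast]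
      rw [List.getElem?_append_left (by omega)]
      rw [← List.getLast?_eq_getElem?]; exact h
    have hz : ((pre.length : Int) == 0) = false := by simp [hne]
    simp [pvBodyA, hget, hz]

-- A-side: the enumerate/flatMap tail of A equals the reference scan
lemma pvMainA (suf : List Char) : ∀ (pre : List Char) (p : Char),
    ((pre = [] ∧ p = '\n') ∨ pre.getLast? = some p) →
    (PySem.List.enumerate suf (pre.length : Int)).flatMap (pvBodyA (pre ++ suf))
      = pvScan p suf := by
  induction suf with
  | nil => intro pre p _; simp [PySem.List.enumerate, pvScan]
  | cons c rest ih =>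
    intro pre p hp
    rw [PySem.List.enumerate_cons]
    have h1 : pre ++ c :: rest = (pre ++ [c]) ++ rest := by simp
    have h2 : (pre.length : Int) + 1 = ((pre ++ [c]).length : Int) := by simp
    simp only [List.flatMap_cons, pvScan]
    rw [pvCond_eq pre (c :: rest) p hp c, h1, h2,
        ih (pre ++ [c]) c (Or.inr (by simp))]

lemma pvFoldl_eq (xs : List (Int × Char)) (t : List Char) (acc : List Char) :
    xs.foldl (fun acc ic => acc ++ pvBodyA t ic) acc = acc ++ xs.flatMap (pvBodyA t) := by
  induction xs generalizing acc with
  | nil => simp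
  | cons x xs ih => simp [ih, List.append_assoc]

-- the part of B's join after the first segment
def pvJoin2 (segs : List (List Char)) : List Char :=
  segs.flatMap (fun s => ':' :: pvFixSeg s)

lemma pvJoin_eq (x : List Char) (xs : List (List Char)) :
    PySem.Chars.join [':'] (x :: xs.map pvFixSeg) = x ++ pvJoin2 xs := by
  induction xs generalizing x with
  | nil => simp [PySem.Chars.join_singleton, pvJoin2]
  | cons y ys ih =>
    simp only [List.map_cons, PySem.Chars.join_cons_cons, pvJoin2, List.flatMap_cons]
    rw [show PySem.Chars.join [':'] (pvFixSeg y :: ys.map pvFixSeg)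
          = pvFixSeg y ++ pvJoin2 ys from ih (pvFixSeg y)]
    simp [pvJoin2, List.append_assoc]

-- B-side: split/fix/join equals the reference scan, both as a first segment
-- (previous char p ≠ ':') and as a later segment (previous char ':')
lemma pvMainB : ∀ r : List Char, ∃ h ss, pvSplitColon r = h :: ss ∧
    (∀ p : Char, p ≠ ':' → pvRepSp h ++ pvJoin2 ss = pvScan p r) ∧
    (pvFixSeg h ++ pvJoin2 ss = pvScan ':' r) := by
  intro r
  induction r with
  | nil =>
    exact ⟨[], [], rfl, fun p _ => rfl, rfl⟩
  | cons c rest ih =>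
    obtain ⟨h, ss, hsplit, ih1, ih2⟩ := ih
    simp only [pvRepSp, beq_iff_eq] at ih1
    by_cases hc : c = ':'
    · subst hc
      refine ⟨[], h :: ss, by simp [pvSplitColon, hsplit], ?_, ?_⟩
      · intro p _
        simp only [pvRepSp, List.flatMap_nil, List.nil_append, pvJoin2, List.flatMap_cons,
          pvScan]
        rw [show pvJoin2 ss = pvJoin2 ss from rfl] at ih2
        simp only [pvJoin2] at ih2 ⊢
        simp [ih2]
      · simp only [pvFixSeg, pvRepSp, PySem.Chars.startswith, pvScan]
        simp only [pvJoin2, List.flatMap_cons] at ih2 ⊢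
        simp [ih2]
    · have hsp : pvSplitColon (c :: rest) = (c :: h) :: ss := by
        simp [pvSplitColon, hsplit, hc]
      refine ⟨c :: h, ss, hsp, ?_, ?_⟩
      · intro p hp
        simp only [pvRepSp, List.flatMap_cons, pvScan, List.append_assoc]
        have : (c == ' ' && !(p == ':')) = (c == ' ') := by
          simp [hp]
        rw [this]
        by_cases hcs : c = ' '
        · subst hcs
          simp only [beq_iff_eq]
          rw [ih1 ' ' (by decide)]
        · simp only [beq_iff_eq, if_neg hcs, List.cons_append, List.nil_append]
          rw [ih1 c hc]
      · by_cases hcs : c = ' '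
        · subst hcs
          simp only [pvFixSeg, PySem.Chars.startswith]
          simp only [List.isPrefixOf, beq_self_eq_true, Bool.true_and, List.drop_succ_cons,
            List.drop_zero, pvScan]
          have hpre : List.isPrefixOf [' '] (' ' :: h) = true := by
            simp [List.isPrefixOf]
          rw [if_pos (by simp)]
          simp only [List.cons_append, pvRepSp, beq_iff_eq]
          rw [ih1 ' ' (by decide)]
          simp
        · have hpre : PySem.Chars.startswith (c :: h) [' '] = false := by
            simp [PySem.Chars.startswith, List.isPrefixOf]
            exact fun hh => hcs hh.symm
          simp only [pvFixSeg, hpre, Bool.false_eq_true, if_false, pvRepSp,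
            List.flatMap_cons, pvScan, List.append_assoc]
          simp only [beq_iff_eq, if_neg hcs, List.cons_append, List.nil_append]
          have : (c == ' ' && !(':' == ':')) = false := by simp
          rw [this]
          simp only [Bool.false_eq_true, if_false, List.cons_append, List.nil_append]
          rw [ih1 c hc]

-- ===== VERDICT (by name: the statement is the Claim_ definition above) =====
theorem format_json_string_spec : Claim_equal_format_json_string := by
  intro s _
  unfold Spec_format_json_string format_json_string format_json_string_alt
  simp only [pvFoldl_eq, List.nil_append]
  obtain ⟨h, ss, hsplit, ih1, _⟩ := pvMainB (PySem.Str.replace s "\n" "<br>").toList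
  rw [hsplit]
  simp only []
  rw [pvJoin_eq, ih1 '\n' (by decide)]
  exact congrArg String.ofList
    (by simpa using pvMainA (PySem.Str.replace s "\n" "<br>").toList [] '\n' (Or.inl ⟨rfl, rfl⟩))
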